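-- pv_equiv track=rewrite | github.com/jeffreyhorn/freedane | src/accessdane_audit/parcel_year_facts.py | _normalize_parcel_number_key
-- ===== SOURCE A (Python) =====
-- from typing import Iterable, Optional
--
-- _PARCEL_NUMBER_SEPARATORS = (" ", ".", "/", "_", "-")
--
-- def _normalize_parcel_number_key(value: Optional[str]) -> Optional[str]:
--     if not isinstance(value, str):
--         return None
--     normalized = value.strip().upper()
--     if not normalized:
--         return None
--     for separator in _PARCEL_NUMBER_SEPARATORS:
--         normalized = normalized.replace(separator, "")
--     return normalized or None
-- ===== SOURCE B (Python) =====
-- from typing import Optional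
--
-- _PARCEL_NUMBER_SEPARATOR_CHARS = " ./_-"
--
-- def _normalize_parcel_number_key(value: Optional[str]) -> Optional[str]:
--     if not isinstance(value, str):
--         return None
--     kept = []
--     for ch in value.strip().upper():
--         if ch not in _PARCEL_NUMBER_SEPARATOR_CHARS:
--             kept.append(ch)
--     return "".join(kept) if kept else None
-- ===== Notes on version B (the rewrite author's own statement) =====
-- stated objective: simpler
-- what changed: Replaces A's five sequential whole-string replace passes and two separate emptiness checks with a single accumulator loop over the stripped, uppercased characters that keeps non-separator characters, ending in one emptiness check.
import Mathlib
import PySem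

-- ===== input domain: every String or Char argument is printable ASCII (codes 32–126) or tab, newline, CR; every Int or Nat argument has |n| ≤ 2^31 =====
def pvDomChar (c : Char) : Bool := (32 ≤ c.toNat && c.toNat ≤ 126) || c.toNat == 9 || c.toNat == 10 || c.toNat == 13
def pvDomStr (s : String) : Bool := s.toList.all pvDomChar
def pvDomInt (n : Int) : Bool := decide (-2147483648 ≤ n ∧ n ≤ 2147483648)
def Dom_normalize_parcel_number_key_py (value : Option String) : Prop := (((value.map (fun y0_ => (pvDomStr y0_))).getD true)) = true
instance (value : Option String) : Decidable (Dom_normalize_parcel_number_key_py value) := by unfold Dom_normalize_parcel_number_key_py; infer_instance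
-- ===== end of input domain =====

-- B replaces A's five sequential whole-string replace passes (plus two emptiness
-- checks) with one accumulator loop keeping non-separator characters (objective: simpler).


-- ===== PORT A =====
def pvParcelSeparators : List String := [" ", ".", "/", "_", "-"]

def normalize_parcel_number_key_py (value : Option String) : Option String :=
  match value with
  | none => none            -- not isinstance(value, str)
  | some v =>
    let normalized := PySem.Str.upper (PySem.Str.strip v)
    if normalized = "" then none
    else
      let normalized := pvParcelSeparators.foldl
        (fun n sep => PySem.Str.replace n sep "") normalized
      if normalized = "" then none else some normalized

-- ===== PORT B =====
def pvSepChars : String := " ./_-"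

def normalize_parcel_number_key_py_alt (value : Option String) : Option String :=
  match value with
  | none => none
  | some v =>
    let kept := (PySem.Str.upper (PySem.Str.strip v)).toList.foldl
      (fun acc ch => if pvSepChars.toList.contains ch then acc else acc ++ [ch]) []
    if kept = [] then none else some (String.ofList kept)

-- ===== PRECONDITION & SPEC =====
def Spec_normalize_parcel_number_key_py (value : Option String) (out : Option String) : Prop := out = normalize_parcel_number_key_py_alt value
instance (value : Option String) (out : Option String) : Decidable (Spec_normalize_parcel_number_key_py value out) := by unfold Spec_normalize_parcel_number_key_py; infer_instance

-- ===== CLAIM (what is proved, stated in full; the proofs are below) =====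
def Claim_equal_normalize_parcel_number_key_py : Prop := ∀ (value : Option String), Dom_normalize_parcel_number_key_py value → Spec_normalize_parcel_number_key_py value (normalize_parcel_number_key_py value)

-- ===== LEMMAS AND PROOFS =====

-- replace.go with a single-char pattern and empty replacement is a filter
lemma replace_go_single (a : Char) :
    ∀ (fuel : Nat) (l acc : List Char), l.length ≤ fuel →
      PySem.Chars.replace.go [a] [] fuel l acc
        = acc.reverse ++ l.filter (fun c => c != a) := by
  intro fuel
  induction fuel with
  | zero =>
    intro l acc h
    have : l = [] := List.eq_nil_of_length_eq_zero (Nat.le_zero.mp h)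
    subst this
    simp [PySem.Chars.replace.go]
  | succ n ih =>
    intro l acc h
    cases l with
    | nil => simp [PySem.Chars.replace.go]
    | cons c t =>
      simp only [List.length_cons, Nat.succ_le_succ_iff] at h
      by_cases hc : c = a
      · subst hc
        have hpre : List.isPrefixOf [c] (c :: t) = true := by
          simp [List.isPrefixOf]
        simp only [PySem.Chars.replace.go, hpre, if_pos, List.reverse_nil,
          List.nil_append, List.length_cons, List.length_nil, List.drop_succ_cons,
          List.drop_zero]
        rw [ih t acc h]
        simp
      · have hpre : List.isPrefixOf [a] (c :: t) = false := by
          simp only [List.isPrefixOf, Bool.and_true,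
            beq_eq_false_iff_ne, ne_eq]
          exact fun h => hc h.symm
        simp only [PySem.Chars.replace.go]
        rw [if_neg (by rw [hpre]; exact Bool.false_ne_true)]
        rw [ih t (c :: acc) h]
        simp [hc]

lemma replace_single (a : Char) (cs : List Char) :
    PySem.Chars.replace cs [a] [] = cs.filter (fun c => c != a) := by
  unfold PySem.Chars.replace
  rw [if_neg (by simp)]
  simpa using replace_go_single a cs.length cs [] le_rfl

-- B's accumulator loop is a filter built on the right
lemma foldl_keep_eq_filter (l : List Char) : ∀ acc : List Char,
    l.foldl (fun acc ch => if pvSepChars.toList.contains ch then acc else acc ++ [ch]) acc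
      = acc ++ l.filter (fun ch => !(pvSepChars.toList.contains ch)) := by
  induction l with
  | nil => intro acc; simp
  | cons c t ih =>
    intro acc
    rw [List.foldl_cons, List.filter_cons]
    by_cases hc : pvSepChars.toList.contains c = true
    · rw [if_pos hc, ih, if_neg (by simp only [hc, Bool.not_true]; exact Bool.false_ne_true)]
    · rw [if_neg hc, ih, if_pos (by simp only [Bool.not_eq_true] at hc; simp only [hc, Bool.not_false])]
      simp

-- the five replace passes of A equal the single filter pass
lemma five_replaces_eq_filter (s : String) :
    pvParcelSeparators.foldl (fun n sep => PySem.Str.replace n sep "") s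
      = String.ofList (s.toList.filter (fun ch => !(pvSepChars.toList.contains ch))) := by
  apply String.ext  -- via toList
  simp only [pvParcelSeparators, List.foldl_cons, List.foldl_nil,
    PySem.Str.toList_replace]
  rw [show (" " : String).toList = [' '] from rfl,
    show ("." : String).toList = ['.'] from rfl,
    show ("/" : String).toList = ['/'] from rfl,
    show ("_" : String).toList = ['_'] from rfl,
    show ("-" : String).toList = ['-'] from rfl,
    show ("" : String).toList = [] from rfl]
  rw [replace_single, replace_single, replace_single, replace_single, replace_single]
  rw [show ∀ l : List Char, (String.ofList l).toList = l from fun l => String.toList_ofList]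
  simp only [List.filter_filter]
  apply List.filter_congr
  intro c _
  have hsep : pvSepChars.toList = [' ', '.', '/', '_', '-'] := rfl
  simp only [hsep, List.contains_cons, List.contains_nil, Bool.or_false, bne, Bool.not_or]
  ac_rfl

-- ===== VERDICT (by name: the statement is the Claim_ definition above) =====
theorem normalize_parcel_number_key_py_spec : Claim_equal_normalize_parcel_number_key_py := by
  intro value _
  unfold Spec_normalize_parcel_number_key_py
  cases value with
  | none => rfl
  | some v =>
    simp only [normalize_parcel_number_key_py, normalize_parcel_number_key_py_alt]
    rw [foldl_keep_eq_filter, List.nil_append]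
    set s := PySem.Str.upper (PySem.Str.strip v) with hs
    by_cases hempty : s = ""
    · have htl : s.toList = [] := by rw [hempty]; rfl
      rw [if_pos hempty]
      simp [htl]
    · rw [if_neg hempty, five_replaces_eq_filter]
      set f := s.toList.filter (fun ch => !(pvSepChars.toList.contains ch)) with hf
      have htl : (String.ofList f).toList = f := String.toList_ofList
      by_cases hfe : f = []
      · have h0 : String.ofList f = "" := by
          rw [hfe]
        rw [if_pos h0]
        exact (if_pos hfe).symm
      · have h1 : String.ofList f ≠ "" := by
          intro h
          apply hfe
          have := congrArg String.toList h
          simpa using this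
        rw [if_neg h1, if_neg hfe]
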